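-- pv_equiv track=rewrite | github.com/dhtmdgh00/kbo | src/main/resources/static/line_visualize.py | splitargv
-- ===== SOURCE A (Python) =====
-- def splitargv(L1):
--     L2 = []
--     for season in L1[2].split('), '):
--         line = remove_parentheses_and_brackets(season.split(', '))
--         for x in line:
--             L2.append(x)
--     L3 = []
--     seasons = []
--     result = L1[:2]
--     for i, num  in enumerate(L2):
--         if i % 9 in [3,4,5,6,7,8]:
--             L3.append(num.split('=')[1])
--         if i % 9 in [2]:
--             seasons.append(num.split('=')[1])
--
--     for i in range(int(len(L3)/6)):
--         result.append(L3[i*6 +0 ])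
--         result.append(L3[i*6 +1 ])
--         result.append(L3[i*6 +2 ])
--         result.append(L3[i*6 +3 ])
--         result.append(L3[i*6 +4 ])
--         result.append(L3[i*6 +5 ])
--         result.append(seasons[i])
--
--     return result
--
-- def remove_parentheses_and_brackets(lst):
--     result = []
--     for item in lst:
--         item_without_parentheses = item.replace(")", "").replace("]", "")
--         result.append(item_without_parentheses)
--     return result
-- ===== SOURCE B (Python) =====
-- def splitargv(L1):
--     L2 = [x.replace(")", "").replace("]", "")
--           for season in L1[2].split('), ')
--           for x in season.split(', ')]
--     result = L1[:2]
--     while len(L2) >= 9: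
--         block, L2 = L2[:9], L2[9:]
--         result += [block[j].split('=')[1] for j in range(3, 9)]
--         result.append(block[2].split('=')[1])
--     return result
-- ===== Notes on version B (the rewrite author's own statement) =====
-- stated objective: simpler
-- what changed: B drops A's L3/seasons intermediate lists built by a modulo-9 index filter and A's separate six-at-a-time regrouping loop, instead peeling L2 apart in blocks of nine and emitting each record's seven fields in one pass.
import Mathlib
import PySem

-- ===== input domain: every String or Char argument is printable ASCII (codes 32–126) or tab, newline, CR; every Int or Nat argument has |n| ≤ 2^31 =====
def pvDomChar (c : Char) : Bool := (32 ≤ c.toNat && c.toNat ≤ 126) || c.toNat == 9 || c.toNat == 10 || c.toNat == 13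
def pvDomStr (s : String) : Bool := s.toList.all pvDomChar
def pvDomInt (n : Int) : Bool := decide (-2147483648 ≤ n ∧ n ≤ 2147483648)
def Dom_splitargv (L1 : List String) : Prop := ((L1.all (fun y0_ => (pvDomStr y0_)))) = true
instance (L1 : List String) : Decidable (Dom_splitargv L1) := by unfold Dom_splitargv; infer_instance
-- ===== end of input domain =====

-- B fuses A's two modulo-filter passes and the separate six-at-a-time regrouping loop into one
-- pass that peels L2 apart in blocks of nine (objective: simpler, same asymptotic cost).

-- shared tiny helper: Python's  num.split('=')[1]  (both programs contain this exact expression;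
-- total via getD "" — Pre_ excludes the inputs where Python raises IndexError here)
-- Python s.split(sep) for a non-empty literal sep (via PySem.Chars.splitOn, exact for sep ≠ '')
def pvSplit (s sep : String) : List String :=
  (PySem.Chars.splitOn s.toList sep.toList).map (fun cs => String.ofList cs)

def pvEq1 (num : String) : String :=
  (PySem.List.pyGet? (pvSplit num "=") 1).getD ""

-- ===== PORT A =====
def remove_parentheses_and_brackets (lst : List String) : List String :=
  lst.foldl (fun result item =>
    result ++ [PySem.Str.replace (PySem.Str.replace item ")" "") "]" ""]) []

-- the 'for i, num in enumerate(L2)' loop of A, with its index counter and (L3, seasons) state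
def splitargvEnumLoop (i : Nat) (L3 seasons : List String) : List String → List String × List String
  | [] => (L3, seasons)
  | num :: rest =>
    let L3' := if i % 9 ∈ ([3,4,5,6,7,8] : List Nat) then L3 ++ [pvEq1 num] else L3
    let seasons' := if i % 9 ∈ ([2] : List Nat) then seasons ++ [pvEq1 num] else seasons
    splitargvEnumLoop (i+1) L3' seasons' rest

-- the 'for i in range(int(len(L3)/6))' regrouping loop of A
def splitargvRegroup (L3 seasons result : List String) : List String :=
  (List.range (L3.length / 6)).foldl (fun (result : List String) (i : Nat) =>
    result ++ [(PySem.List.pyGet? L3 (↑(i*6+0))).getD "",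
               (PySem.List.pyGet? L3 (↑(i*6+1))).getD "",
               (PySem.List.pyGet? L3 (↑(i*6+2))).getD "",
               (PySem.List.pyGet? L3 (↑(i*6+3))).getD "",
               (PySem.List.pyGet? L3 (↑(i*6+4))).getD "",
               (PySem.List.pyGet? L3 (↑(i*6+5))).getD "",
               (PySem.List.pyGet? seasons (↑i)).getD ""]) result

def splitargv (L1 : List String) : List String :=
  let L2 := (pvSplit ((PySem.List.pyGet? L1 2).getD "") "), ").foldl
      (fun L2 season =>
        (remove_parentheses_and_brackets (pvSplit season ", ")).foldl
          (fun L2 x => L2 ++ [x]) L2) []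
  let p := splitargvEnumLoop 0 [] [] L2
  splitargvRegroup p.1 p.2 (PySem.List.slice L1 (some 0) (some 2))

-- ===== PORT B =====
-- the 'while len(L2) >= 9' loop of B: peel one 9-element block, emit its seven fields
-- (the slices L2[:9] / L2[9:] are realized by destructuring the first nine elements)
def splitargvAltLoop : List String → List String → List String
  | a0 :: a1 :: a2 :: a3 :: a4 :: a5 :: a6 :: a7 :: a8 :: rest, result =>
    let block := [a0, a1, a2, a3, a4, a5, a6, a7, a8]
    splitargvAltLoop rest
      ((result ++ (PySem.List.pyRange 3 9 1).map
          (fun j => pvEq1 ((PySem.List.pyGet? block j).getD ""))) ++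
        [pvEq1 ((PySem.List.pyGet? block 2).getD "")])
  | _, result => result

def splitargv_alt (L1 : List String) : List String :=
  let L2 := (pvSplit ((PySem.List.pyGet? L1 2).getD "") "), ").flatMap
      (fun season => (pvSplit season ", ").map
        (fun x => PySem.Str.replace (PySem.Str.replace x ")" "") "]" ""))
  splitargvAltLoop L2 (PySem.List.slice L1 (some 0) (some 2))

-- ===== PRECONDITION & SPEC =====
-- the list L2 the Python builds from L1[2] (used only to state Pre_/Raises_)
def pvL2 (L1 : List String) : List String :=
  (pvSplit (L1.getD 2 "") "), ").flatMap
    (fun season => (pvSplit season ", ").map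
      (fun x => PySem.Str.replace (PySem.Str.replace x ")" "") "]" ""))

-- Pre_ excludes exactly the inputs where Python A raises IndexError: lists shorter than 3
-- (L1[2]) and those where some element of L2 at index i with i % 9 ≥ 2 contains no '='
-- (num.split('=')[1]).
def Pre_splitargv (L1 : List String) : Prop :=
  3 ≤ L1.length ∧
  ∀ i, (h : i < (pvL2 L1).length) → 2 ≤ i % 9 →
    2 ≤ (pvSplit ((pvL2 L1)[i]'h) "=").length
instance (L1 : List String) : Decidable (Pre_splitargv L1) := by
  unfold Pre_splitargv; infer_instance

def pvWitness_splitargv : List String := ["a", "b", ""]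

def Spec_splitargv (L1 : List String) (out : List String) : Prop := out = splitargv_alt L1
instance (L1 : List String) (out : List String) : Decidable (Spec_splitargv L1 out) := by unfold Spec_splitargv; infer_instance

-- ===== CLAIM (what is proved, stated in full; the proofs are below) =====
def Claim_equal_splitargv : Prop := ∀ (L1 : List String), Dom_splitargv L1 → Pre_splitargv L1 → Spec_splitargv L1 (splitargv L1)
-- ===== LEMMAS AND PROOFS =====

theorem pv_L2_eq (s : String) :
    (pvSplit s "), ").foldl
      (fun L2 season =>
        (remove_parentheses_and_brackets (pvSplit season ", ")).foldl
          (fun L2 x => L2 ++ [x]) L2) [] =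
    (pvSplit s "), ").flatMap
      (fun season => (pvSplit season ", ").map
        (fun x => PySem.Str.replace (PySem.Str.replace x ")" "") "]" "")) := by
  have hrm : ∀ l : List String, remove_parentheses_and_brackets l =
      l.map (fun x => PySem.Str.replace (PySem.Str.replace x ")" "") "]" "") := by
    intro l
    unfold remove_parentheses_and_brackets
    simpa using PySem.List.foldl_append_singleton_eq_map
      (fun x => PySem.Str.replace (PySem.Str.replace x ")" "") "]" "") l []
  simp only [hrm, PySem.List.foldl_append_singleton]
  simpa using PySem.List.foldl_append_eq_flatMap
    (fun season => (pvSplit season ", ").map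
      (fun x => PySem.Str.replace (PySem.Str.replace x ")" "") "]" "")) (pvSplit s "), ") []

theorem pv_enum_mod (L2 : List String) : ∀ i j L3 s, i % 9 = j % 9 →
    splitargvEnumLoop i L3 s L2 = splitargvEnumLoop j L3 s L2 := by
  induction L2 with
  | nil => intros; rfl
  | cons num rest ih =>
    intro i j L3 s h
    simp only [splitargvEnumLoop, h]
    exact ih (i+1) (j+1) _ _ (by omega)

theorem pv_enum_acc (L2 : List String) : ∀ i L3 s,
    splitargvEnumLoop i L3 s L2 =
      (L3 ++ (splitargvEnumLoop i [] [] L2).1, s ++ (splitargvEnumLoop i [] [] L2).2) := by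
  induction L2 with
  | nil => intro i L3 s; simp [splitargvEnumLoop]
  | cons num rest ih =>
    intro i L3 s
    simp only [splitargvEnumLoop]
    by_cases h3 : i % 9 ∈ ([3,4,5,6,7,8] : List Nat) <;>
      by_cases h2 : i % 9 ∈ ([2] : List Nat) <;>
        simp only [h3, h2, if_true, if_false] <;>
        (conv_rhs => rw [ih (i+1)]) <;> rw [ih (i+1)] <;> simp

theorem pv_enum_len (L2 : List String) : ∀ i L3 s,
    (splitargvEnumLoop i L3 s L2).1.length ≤ L3.length + L2.length := by
  induction L2 with
  | nil => intro i L3 s; simp [splitargvEnumLoop]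
  | cons num rest ih =>
    intro i L3 s
    simp only [splitargvEnumLoop]
    split <;> split <;>
      refine le_trans (ih _ _ _) ?_ <;> simp <;> omega

theorem pv_alt_short (L2 : List String) (result : List String) (h : L2.length < 9) :
    splitargvAltLoop L2 result = result := by
  rcases L2 with _|⟨a0,_|⟨a1,_|⟨a2,_|⟨a3,_|⟨a4,_|⟨a5,_|⟨a6,_|⟨a7,_|⟨a8,rest⟩⟩⟩⟩⟩⟩⟩⟩⟩ <;>
    first
      | rfl
      | (simp at h; omega)

theorem pv_enum_short (L2 : List String) (h : L2.length < 9) :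
    (splitargvEnumLoop 0 [] [] L2).1.length < 6 := by
  rcases L2 with _|⟨a,_|⟨b,_|⟨c,rest⟩⟩⟩
  · simp [splitargvEnumLoop]
  · simp [splitargvEnumLoop]
  · simp [splitargvEnumLoop]
  · have h3 : splitargvEnumLoop 0 [] [] (a::b::c::rest) =
        splitargvEnumLoop 3 [] [pvEq1 c] rest := by
      simp [splitargvEnumLoop]
    have := pv_enum_len rest 3 [] [pvEq1 c]
    rw [h3]
    simp at h this ⊢
    omega

theorem pv_regroup_nil (L3 seasons result : List String) (h : L3.length < 6) :
    splitargvRegroup L3 seasons result = result := by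
  unfold splitargvRegroup
  have h0 : L3.length / 6 = 0 := by omega
  rw [h0]
  rfl

theorem pv_regroup_step (u0 u1 u2 u3 u4 u5 s0 : String) (T' S' acc : List String) :
    splitargvRegroup ([u0,u1,u2,u3,u4,u5] ++ T') (s0 :: S') acc =
    splitargvRegroup T' S' (acc ++ [u0,u1,u2,u3,u4,u5,s0]) := by
  unfold splitargvRegroup
  have h6 : ([u0,u1,u2,u3,u4,u5] ++ T').length / 6 = T'.length / 6 + 1 := by
    simp; omega
  rw [h6, List.range_succ_eq_map, List.foldl_cons, List.foldl_map]
  have hT : ∀ (i k : Nat), k < 6 →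
      (PySem.List.pyGet? ([u0,u1,u2,u3,u4,u5] ++ T') ((Nat.succ i * 6 + k : Nat) : Int)).getD "" =
      (PySem.List.pyGet? T' ((i * 6 + k : Nat) : Int)).getD "" := by
    intro i k hk
    rw [PySem.List.pyGet?_natCast, PySem.List.pyGet?_natCast,
        List.getElem?_append_right (by simp; omega)]
    congr 2
    simp
    omega
  have hfun : (fun (result : List String) (i : Nat) => result ++
        [(PySem.List.pyGet? ([u0,u1,u2,u3,u4,u5] ++ T') ((Nat.succ i * 6 + 0 : Nat) : Int)).getD "",
         (PySem.List.pyGet? ([u0,u1,u2,u3,u4,u5] ++ T') ((Nat.succ i * 6 + 1 : Nat) : Int)).getD "",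
         (PySem.List.pyGet? ([u0,u1,u2,u3,u4,u5] ++ T') ((Nat.succ i * 6 + 2 : Nat) : Int)).getD "",
         (PySem.List.pyGet? ([u0,u1,u2,u3,u4,u5] ++ T') ((Nat.succ i * 6 + 3 : Nat) : Int)).getD "",
         (PySem.List.pyGet? ([u0,u1,u2,u3,u4,u5] ++ T') ((Nat.succ i * 6 + 4 : Nat) : Int)).getD "",
         (PySem.List.pyGet? ([u0,u1,u2,u3,u4,u5] ++ T') ((Nat.succ i * 6 + 5 : Nat) : Int)).getD "",
         (PySem.List.pyGet? (s0 :: S') ((Nat.succ i : Nat) : Int)).getD ""]) =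
      (fun (result : List String) (i : Nat) => result ++
        [(PySem.List.pyGet? T' ((i * 6 + 0 : Nat) : Int)).getD "",
         (PySem.List.pyGet? T' ((i * 6 + 1 : Nat) : Int)).getD "",
         (PySem.List.pyGet? T' ((i * 6 + 2 : Nat) : Int)).getD "",
         (PySem.List.pyGet? T' ((i * 6 + 3 : Nat) : Int)).getD "",
         (PySem.List.pyGet? T' ((i * 6 + 4 : Nat) : Int)).getD "",
         (PySem.List.pyGet? T' ((i * 6 + 5 : Nat) : Int)).getD "",
         (PySem.List.pyGet? S' ((i : Nat) : Int)).getD ""]) := by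
    funext result i
    rw [hT i 0 (by omega), hT i 1 (by omega), hT i 2 (by omega), hT i 3 (by omega),
        hT i 4 (by omega), hT i 5 (by omega)]
    congr 2
    simp
  rw [hfun]
  congr 1
  simp [pysem]


theorem pv_main (L2 : List String) : ∀ result : List String,
    splitargvRegroup (splitargvEnumLoop 0 [] [] L2).1 (splitargvEnumLoop 0 [] [] L2).2 result =
    splitargvAltLoop L2 result := by
  suffices h : ∀ (n : Nat) (L2 : List String), L2.length ≤ n → ∀ result : List String,
      splitargvRegroup (splitargvEnumLoop 0 [] [] L2).1 (splitargvEnumLoop 0 [] [] L2).2 result =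
      splitargvAltLoop L2 result from fun result => h L2.length L2 le_rfl result
  intro n
  induction n with
  | zero =>
    intro L2 hl result
    have hlt : L2.length < 9 := by omega
    rw [pv_alt_short L2 result hlt, pv_regroup_nil _ _ _ (pv_enum_short L2 hlt)]
  | succ n ih =>
    intro L2 hl result
    by_cases hlt : L2.length < 9
    · rw [pv_alt_short L2 result hlt, pv_regroup_nil _ _ _ (pv_enum_short L2 hlt)]
    · rcases L2 with _ | ⟨a0, L2⟩
      · simp at hlt
      rcases L2 with _ | ⟨a1, L2⟩
      · simp at hlt
      rcases L2 with _ | ⟨a2, L2⟩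
      · simp at hlt
      rcases L2 with _ | ⟨a3, L2⟩
      · simp at hlt
      rcases L2 with _ | ⟨a4, L2⟩
      · simp at hlt
      rcases L2 with _ | ⟨a5, L2⟩
      · simp at hlt
      rcases L2 with _ | ⟨a6, L2⟩
      · simp at hlt
      rcases L2 with _ | ⟨a7, L2⟩
      · simp at hlt
      rcases L2 with _ | ⟨a8, L2⟩
      · simp at hlt
      have h9 : splitargvEnumLoop 0 [] [] (a0::a1::a2::a3::a4::a5::a6::a7::a8::L2) =
          splitargvEnumLoop 9 [pvEq1 a3, pvEq1 a4, pvEq1 a5, pvEq1 a6, pvEq1 a7, pvEq1 a8]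
            [pvEq1 a2] L2 := by
        simp [splitargvEnumLoop]
      rw [h9, pv_enum_mod L2 9 0 _ _ (by norm_num), pv_enum_acc]
      dsimp only
      rw [show ([pvEq1 a2] ++ (splitargvEnumLoop 0 [] [] L2).2) =
            pvEq1 a2 :: (splitargvEnumLoop 0 [] [] L2).2 from rfl]
      rw [pv_regroup_step]
      rw [ih L2 (by simp at hl; omega)]
      have hr : PySem.List.pyRange 3 9 1 = [3,4,5,6,7,8] := by decide
      have hblock : splitargvAltLoop (a0::a1::a2::a3::a4::a5::a6::a7::a8::L2) result =
          splitargvAltLoop L2 (result ++ [pvEq1 a3, pvEq1 a4, pvEq1 a5, pvEq1 a6, pvEq1 a7,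
            pvEq1 a8, pvEq1 a2]) := by
        rw [splitargvAltLoop]
        congr 1
        simp only [hr, List.map_cons, List.map_nil]
        simp only [PySem.List.pyGet?, PySem.List.pyIdx?]
        norm_num
        and_intros <;> rfl
      rw [hblock]

-- ===== VERDICT (by name: the statement is the Claim_ definition above) =====
theorem splitargv_spec : Claim_equal_splitargv := by
  intro L1 _ _
  show splitargv L1 = splitargv_alt L1
  unfold splitargv splitargv_alt
  simp only [pv_L2_eq]
  exact pv_main _ _
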